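-- pv_equiv track=rewrite | github.com/microsoft/AzureTRE | cli/tre/commands/login.py | all_or_none
-- ===== SOURCE A (Python) =====
-- def all_or_none(values: "list(bool)") -> bool:
--     """Returns:
--        True if all set
--        False if all unset
--        None otherwise
--     """
--
--     if len(values) == 0:
--         return None
--
--     first_value = True if values[0] else False  # convert to truthy
--     for value in values[1:]:
--         current_value = True if value else False
--         if first_value is not current_value:
--             # value doesn't match first version
--             return None
--     return first_value
-- ===== SOURCE B (Python) =====
-- def all_or_none(values: "list(bool)") -> bool:
--     s = {bool(v) for v in values}
--     return s.pop() if len(s) == 1 else None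
-- ===== Notes on version B (the rewrite author's own statement) =====
-- stated objective: simpler
-- what changed: Replaces the first-value-tracking early-return loop with a set comprehension collecting the distinct truthiness values and a cardinality test (1 -> the common bool, 0 or 2 -> None).
import Mathlib
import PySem

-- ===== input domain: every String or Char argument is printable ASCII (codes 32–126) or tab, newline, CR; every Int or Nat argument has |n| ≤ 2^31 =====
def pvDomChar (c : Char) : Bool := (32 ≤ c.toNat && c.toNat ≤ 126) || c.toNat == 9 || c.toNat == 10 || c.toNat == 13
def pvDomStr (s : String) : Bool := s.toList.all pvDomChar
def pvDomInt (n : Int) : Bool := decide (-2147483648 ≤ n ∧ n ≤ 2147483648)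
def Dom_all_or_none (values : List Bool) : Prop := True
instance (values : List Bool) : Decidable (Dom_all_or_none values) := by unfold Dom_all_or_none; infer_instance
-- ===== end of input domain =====

-- B replaces A's first-value-tracking early-return loop with a distinct-truthiness set and a cardinality test (simpler decomposition).


-- ===== PORT A =====
-- the 'for value in values[1:]' loop, returning early on a mismatch
def allOrNoneLoop (first : Bool) : List Bool → Option Bool
  | [] => some first
  | v :: vs =>
      -- current_value = True if value else False; on Bool this is v itself
      if first ≠ v then none else allOrNoneLoop first vs

def all_or_none (values : List Bool) : Option Bool :=
  match values with
  | [] => none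
  | v0 :: rest =>
      -- first_value = True if values[0] else False; on Bool this is v0
      allOrNoneLoop v0 rest

-- ===== PORT B =====
def all_or_none_alt (values : List Bool) : Option Bool :=
  match PySem.Set.ofList values with
  | [x] => some x          -- len(s) == 1: s.pop() yields the unique element
  | _ => none

-- ===== PRECONDITION & SPEC =====
def Spec_all_or_none (values : List Bool) (out : Option Bool) : Prop := out = all_or_none_alt values
instance (values : List Bool) (out : Option Bool) : Decidable (Spec_all_or_none values out) := by unfold Spec_all_or_none; infer_instance

-- ===== CLAIM (what is proved, stated in full; the proofs are below) =====
def Claim_equal_all_or_none : Prop := ∀ (values : List Bool), Dom_all_or_none values → Spec_all_or_none values (all_or_none values)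

-- ===== LEMMAS AND PROOFS =====

theorem foldl_add_both (f : Bool) (rest : List Bool) :
    rest.foldl PySem.Set.add [f, !f] = [f, !f] := by
  induction rest with
  | nil => rfl
  | cons v vs ih =>
      have h : PySem.Set.add [f, !f] v = [f, !f] := by cases f <;> cases v <;> decide
      simpa [h] using ih

theorem foldl_add_single (f : Bool) (rest : List Bool) :
    rest.foldl PySem.Set.add [f] = if rest.all (· == f) then [f] else [f, !f] := by
  induction rest with
  | nil => rfl
  | cons v vs ih =>
      by_cases hv : v = f
      · subst hv
        have h : PySem.Set.add [v] v = [v] := by cases v <;> decide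
        simp [ih, List.all_cons]
      · have hv' : v = !f := by cases f <;> cases v <;> simp_all
        subst hv'
        have h : PySem.Set.add [f] (!f) = [f, !f] := by cases f <;> decide
        have hall : (((!f) :: vs).all (· == f)) = false := by cases f <;> simp
        simp only [hall, List.foldl_cons, h, foldl_add_both, if_neg Bool.false_ne_true]

theorem loop_eq (f : Bool) (rest : List Bool) :
    allOrNoneLoop f rest = if rest.all (· == f) then some f else none := by
  induction rest with
  | nil => rfl
  | cons v vs ih =>
      by_cases hv : f = v
      · subst hv
        simp [allOrNoneLoop, ih, List.all_cons]
      · have : (v == f) = false := by cases f <;> cases v <;> simp_all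
        simp [allOrNoneLoop, hv, List.all_cons, this]

-- ===== VERDICT (by name: the statement is the Claim_ definition above) =====
theorem all_or_none_spec : Claim_equal_all_or_none := by
  intro values _
  unfold Spec_all_or_none
  cases values with
  | nil => rfl
  | cons f rest =>
      have hset : PySem.Set.ofList (f :: rest) =
          if rest.all (· == f) then [f] else [f, !f] := by
        rw [PySem.Set.ofList_eq_foldl]
        simpa using foldl_add_single f rest
      simp only [all_or_none, all_or_none_alt, loop_eq, hset]
      by_cases h : rest.all (· == f) <;> simp [h]
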